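-- pv_equiv track=rewrite | github.com/cookie0271/code | 滑动窗口与双指针/定长滑动窗口/拆炸弹.py | decrypt
-- ===== SOURCE A (Python) =====
-- from typing import List
--
-- def decrypt(code: List[int], k: int) -> List[int]:
--     n = len(code)
--     r = k + 1 if k > 0 else n  # 第一个窗口的右开端点
--     k = abs(k)
--     s = sum(code[r - k: r])  # 第一个窗口的元素和
--
--     ans = [0] * n
--     for i in range(n):
--         ans[i] = s
--         s += code[r % n] - code[(r - k) % n]
--         r += 1
--     return ans
-- ===== SOURCE B (Python) =====
-- def _psums(vals):
--     """Running totals: out[i] = sum of the first i values."""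
--     out = [0]
--     for v in vals:
--         out.append(out[-1] + v)
--     return out
--
--
-- def decrypt(code, k):
--     # Flow view of the sliding window: output i equals the initial window's
--     # sum, plus everything that has entered the window during the first i
--     # steps, minus everything that has left it.  The enter/leave streams are
--     # prefix-summed once, so each output is a closed-form combination.
--     n = len(code)
--     right = k + 1 if k > 0 else n      # first position to enter the window
--     left = right - abs(k)              # first position to leave the window
--     base = sum(code[left:right])       # the initial window
--     entered = _psums(code[(right + t) % n] for t in range(n))
--     gone = _psums(code[(left + t) % n] for t in range(n))
--     return [base + entered[i] - gone[i] for i in range(n)]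
-- ===== Notes on version B (the rewrite author's own statement) =====
-- stated objective: alternative
-- what changed: Replaces A's single in-place loop that carries a running window sum and a moving pointer by precomputing prefix sums of the two circular streams of elements entering and leaving the window, so each output is a per-index closed form base + entered[i] - gone[i] with no mutable running state.
import Mathlib
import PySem

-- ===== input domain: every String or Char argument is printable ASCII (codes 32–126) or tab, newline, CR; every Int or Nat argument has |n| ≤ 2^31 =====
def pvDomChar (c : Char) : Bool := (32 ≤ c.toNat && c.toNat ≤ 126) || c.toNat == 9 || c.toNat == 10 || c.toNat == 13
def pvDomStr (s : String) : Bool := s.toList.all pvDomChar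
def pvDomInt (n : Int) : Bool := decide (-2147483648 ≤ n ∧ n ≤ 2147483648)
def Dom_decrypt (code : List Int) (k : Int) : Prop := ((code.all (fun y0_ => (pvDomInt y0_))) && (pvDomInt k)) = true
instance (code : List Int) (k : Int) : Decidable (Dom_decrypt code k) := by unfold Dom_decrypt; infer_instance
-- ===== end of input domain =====

-- B replaces A's in-place running-sum loop by prefix sums of the enter/leave streams and a per-index closed form (alternative algorithm, same cost).

-- ===== PORT A =====
-- the in-loop indices r % n and (r - k) % n are always in [0, n) when the loop runs (n > 0), so pyGet? is some and getD 0 is exact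
def decrypt (code : List Int) (k : Int) : List Int :=
  let n : Int := code.length
  let r : Int := if k > 0 then k + 1 else n
  let k' : Int := |k|
  let s : Int := (PySem.List.slice code (some (r - k')) (some r)).sum
  (((PySem.List.pyRange 0 n 1).foldl
    (fun (st : Int × Int × List Int) _ =>
      (st.1 + (PySem.List.pyGet? code (PySem.Int.mod st.2.1 (code.length : Int))).getD 0
          - (PySem.List.pyGet? code (PySem.Int.mod (st.2.1 - k') (code.length : Int))).getD 0,
       st.2.1 + 1, st.2.2 ++ [st.1]))
    (s, r, [])) : Int × Int × List Int).2.2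

-- ===== PORT B =====
-- _psums from Source B, step for step
def pvPsums (vals : List Int) : List Int :=
  vals.foldl (fun out v => out ++ [(PySem.List.pyGet? out (-1)).getD 0 + v]) [0]

-- the stream indices (right + t) % n and (left + t) % n are in [0, n) whenever the streams are nonempty (n > 0),
-- and entered/gone are indexed at i < n ≤ their length, so every pyGet? is some and getD 0 is exact
def decrypt_alt (code : List Int) (k : Int) : List Int :=
  let n : Int := code.length
  let right : Int := if k > 0 then k + 1 else n
  let left : Int := right - |k|
  let base : Int := (PySem.List.slice code (some left) (some right)).sum
  let entered : List Int := pvPsums ((PySem.List.pyRange 0 n 1).map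
    (fun t => (PySem.List.pyGet? code (PySem.Int.mod (right + t) n)).getD 0))
  let gone : List Int := pvPsums ((PySem.List.pyRange 0 n 1).map
    (fun t => (PySem.List.pyGet? code (PySem.Int.mod (left + t) n)).getD 0))
  (PySem.List.pyRange 0 n 1).map
    (fun i => base + (PySem.List.pyGet? entered i).getD 0 - (PySem.List.pyGet? gone i).getD 0)

-- ===== PRECONDITION & SPEC =====
def Spec_decrypt (code : List Int) (k : Int) (out : List Int) : Prop := out = decrypt_alt code k
instance (code : List Int) (k : Int) (out : List Int) : Decidable (Spec_decrypt code k out) := by unfold Spec_decrypt; infer_instance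

-- ===== CLAIM (what is proved, stated in full; the proofs are below) =====
def Claim_equal_decrypt : Prop := ∀ (code : List Int) (k : Int), Dom_decrypt code k → Spec_decrypt code k (decrypt code k)

-- ===== LEMMAS AND PROOFS =====

-- g t = code[t % n] with Python's floor mod (n = len code)
def pvG (code : List Int) (t : Int) : Int :=
  (PySem.List.pyGet? code (PySem.Int.mod t (code.length : Int))).getD 0

-- C x i = sum of i consecutive circular elements starting at index x (mod n)
def pvC (code : List Int) (x : Int) (i : Nat) : Int :=
  ((List.range i).map (fun t : Nat => pvG code (x + (t : Int)))).sum

theorem pvC_zero (code : List Int) (x : Int) : pvC code x 0 = 0 := by simp [pvC]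

theorem pvC_succ (code : List Int) (x : Int) (i : Nat) :
    pvC code x (i + 1) = pvC code x i + pvG code (x + (i : Int)) := by
  rw [pvC, pvC, List.range_succ]; simp

-- A's loop, generalized: the running sum is s0 plus a difference of two circular sums
theorem pvLoopA (code : List Int) (k' r0 s0 : Int) :
    ∀ (L : List Int) (i : Nat) (acc : List Int),
      L.foldl (fun (st : Int × Int × List Int) _ =>
          (st.1 + (PySem.List.pyGet? code (PySem.Int.mod st.2.1 (code.length : Int))).getD 0
              - (PySem.List.pyGet? code (PySem.Int.mod (st.2.1 - k') (code.length : Int))).getD 0,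
           st.2.1 + 1, st.2.2 ++ [st.1]))
        (s0 + pvC code r0 i - pvC code (r0 - k') i, r0 + (i : Int), acc)
      = (s0 + pvC code r0 (i + L.length) - pvC code (r0 - k') (i + L.length),
         r0 + (i : Int) + L.length,
         acc ++ (List.range L.length).map (fun j : Nat =>
           s0 + pvC code r0 (i + j) - pvC code (r0 - k') (i + j))) := by
  intro L
  induction L with
  | nil => intro i acc; simp
  | cons x L ih =>
    intro i acc
    rw [List.foldl_cons]
    have e1 : (PySem.List.pyGet? code (PySem.Int.mod (r0 + (i : Int)) (code.length : Int))).getD 0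
        = pvG code (r0 + (i : Int)) := rfl
    have e2 : (PySem.List.pyGet? code (PySem.Int.mod (r0 + (i : Int) - k') (code.length : Int))).getD 0
        = pvG code ((r0 - k') + (i : Int)) := by
      show pvG code (r0 + (i : Int) - k') = _
      congr 1; ring
    have hstep : ((s0 + pvC code r0 i - pvC code (r0 - k') i, r0 + (i : Int), acc).1 +
            (PySem.List.pyGet? code (PySem.Int.mod (s0 + pvC code r0 i - pvC code (r0 - k') i, r0 + (i : Int), acc).2.1 (code.length : Int))).getD 0 -
          (PySem.List.pyGet? code (PySem.Int.mod ((s0 + pvC code r0 i - pvC code (r0 - k') i, r0 + (i : Int), acc).2.1 - k') (code.length : Int))).getD 0,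
        (s0 + pvC code r0 i - pvC code (r0 - k') i, r0 + (i : Int), acc).2.1 + 1,
        (s0 + pvC code r0 i - pvC code (r0 - k') i, r0 + (i : Int), acc).2.2
          ++ [(s0 + pvC code r0 i - pvC code (r0 - k') i, r0 + (i : Int), acc).1])
        = (s0 + pvC code r0 (i + 1) - pvC code (r0 - k') (i + 1), r0 + ((i + 1 : Nat) : Int),
           acc ++ [s0 + pvC code r0 i - pvC code (r0 - k') i]) := by
      show (s0 + pvC code r0 i - pvC code (r0 - k') i
            + (PySem.List.pyGet? code (PySem.Int.mod (r0 + (i : Int)) (code.length : Int))).getD 0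
            - (PySem.List.pyGet? code (PySem.Int.mod (r0 + (i : Int) - k') (code.length : Int))).getD 0,
          r0 + (i : Int) + 1, acc ++ [s0 + pvC code r0 i - pvC code (r0 - k') i]) = _
      rw [e1, e2, pvC_succ, pvC_succ]
      simp only [Prod.mk.injEq]
      refine ⟨by ring, by push_cast; ring, trivial⟩
    rw [hstep, ih (i + 1) (acc ++ [s0 + pvC code r0 i - pvC code (r0 - k') i])]
    simp only [Prod.mk.injEq, List.length_cons]
    refine ⟨by rw [show i + 1 + L.length = i + (L.length + 1) from by omega],
            by push_cast; ring, ?_⟩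
    rw [List.range_succ_eq_map]
    simp only [List.map_cons, List.map_map, List.cons_append, List.append_assoc,
      List.nil_append, add_zero]
    congr 1
    congr 1
    apply List.map_congr_left
    intro j _
    simp only [Function.comp_apply]
    rw [show i + (j + 1) = i + 1 + j from by omega]

-- A's fold packaged as a map over range n
theorem pvFoldA (code : List Int) (k' r0 s0 : Int) :
    (((PySem.List.pyRange 0 (code.length : Int)).foldl
      (fun (st : Int × Int × List Int) _ =>
          (st.1 + (PySem.List.pyGet? code (PySem.Int.mod st.2.1 (code.length : Int))).getD 0
              - (PySem.List.pyGet? code (PySem.Int.mod (st.2.1 - k') (code.length : Int))).getD 0,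
           st.2.1 + 1, st.2.2 ++ [st.1]))
        (s0, r0, [])) : Int × Int × List Int).2.2
      = (List.range code.length).map (fun j : Nat =>
          s0 + pvC code r0 j - pvC code (r0 - k') j) := by
  have h := pvLoopA code k' r0 s0 (PySem.List.pyRange 0 (code.length : Int)) 0 []
  simp only [pvC_zero, Nat.cast_zero, add_zero, sub_zero, zero_add, List.nil_append,
    PySem.List.length_pyRange_one, Int.toNat_natCast] at h
  rw [h]

-- pvPsums is the list of prefix sums
theorem pvPsumsAux (xs : List Int) :
    ∀ (acc : List Int) (L : Int), PySem.List.pyGet? acc (-1) = some L →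
      xs.foldl (fun out v => out ++ [(PySem.List.pyGet? out (-1)).getD 0 + v]) acc
        = acc ++ (List.range xs.length).map (fun j : Nat => L + (xs.take (j + 1)).sum) := by
  induction xs with
  | nil => intro acc L _; simp
  | cons v xs ih =>
    intro acc L hL
    rw [List.foldl_cons, hL]
    rw [ih (acc ++ [(some L).getD 0 + v]) (L + v)
      (by simp [PySem.List.pyGet?_neg_one_append_singleton])]
    simp only [Option.getD_some, List.append_assoc, List.length_cons, List.singleton_append]
    congr 1
    rw [List.range_succ_eq_map]
    simp only [List.map_cons, List.map_map, List.take_succ_cons, List.take_zero, List.sum_cons,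
      List.sum_nil, add_zero]
    congr 1
    apply List.map_congr_left
    intro j _
    simp only [Function.comp_apply]
    ring

theorem pvPsums_eq (xs : List Int) :
    pvPsums xs = 0 :: (List.range xs.length).map (fun j : Nat => (xs.take (j + 1)).sum) := by
  rw [pvPsums, pvPsumsAux xs [0] 0 rfl]
  simp

-- indexing pvPsums gives the sum of the first y elements
theorem pvPsumsGet (xs : List Int) (y : Nat) (hy : y ≤ xs.length) :
    (PySem.List.pyGet? (pvPsums xs) (y : Nat)).getD 0 = (xs.take y).sum := by
  rw [pvPsums_eq, PySem.List.pyGet?_natCast]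
  cases y with
  | zero => simp
  | succ y =>
    simp only [List.getElem?_cons_succ]
    rw [List.getElem?_map, List.getElem?_range (by omega)]
    rfl

-- a prefix of the circular stream starting at x sums to C x j
theorem pvStreamTake (code : List Int) (x : Int) (n' j : Nat) (hj : j ≤ n') :
    ((((List.range n').map (fun tN : Nat =>
        (PySem.List.pyGet? code (PySem.Int.mod (x + (tN : Int)) (code.length : Int))).getD 0))).take j).sum
      = pvC code x j := by
  rw [← List.map_take, List.take_range]
  have h : min j n' = j := by omega
  rw [h]
  rfl

theorem decrypt_main : ∀ (code : List Int) (k : Int), decrypt code k = decrypt_alt code k := by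
  intro code k
  simp only [decrypt, decrypt_alt]
  rw [pvFoldA code |k| (if k > 0 then k + 1 else (code.length : Int))
    ((PySem.List.slice code
      (some ((if k > 0 then k + 1 else (code.length : Int)) - |k|))
      (some (if k > 0 then k + 1 else (code.length : Int)))).sum)]
  rw [PySem.List.pyRange_one]
  simp only [sub_zero, Int.toNat_natCast, List.map_map]
  apply List.map_congr_left
  intro j hj
  rw [List.mem_range] at hj
  simp only [Function.comp_apply, zero_add]
  rw [pvPsumsGet _ j (by simp; omega),
      pvPsumsGet _ j (by simp; omega)]
  simp only [Function.comp_def]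
  rw [pvStreamTake code _ code.length j (le_of_lt hj),
      pvStreamTake code _ code.length j (le_of_lt hj)]

-- ===== VERDICT (by name: the statement is the Claim_ definition above) =====
theorem decrypt_spec : Claim_equal_decrypt := by
  intro code k _
  exact decrypt_main code k
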